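-- pv_equiv track=rewrite | github.com/davidfaianunes/Programming-s-Fundamentals-Project | main.py | obter_pin
-- ===== SOURCE A (Python) =====
-- def obter_posicao(direction: str, digit: int) -> int:
--     """
--     This function takes one string containing one character that represents the direction of one movement
--     ("C", "B", "E" or "D") and an int representing the current position (any digit from 1 to 9); it must return
--     the digit that corresponds to the new position.
--         Note that "C", "B", "E" and "D" correlate to up, down, left and right, respectively.
--
--
--     :param direction: str
--     :param digit: int
--     :return: int
--     """
--
--
--     # To keep track of the limits of the pad (so, per example, we don't "go right" from the digit "3")
--     # we determine the line and col in which the digit is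
--
--     if digit <= 3:
--         line = 1
--         col = digit
--     elif digit <= 6:
--         line = 2
--         col = digit - 3
--     else:
--         line = 3
--         col = digit - 6
--
--     # The new digit and its line/column are computed
--
--     if direction == "C" and line > 1:
--         line -= 1
--         digit -= 3
--     if direction == "B" and line < 3:
--         line += 1
--         digit += 3
--     if direction == "D" and col < 3:
--         col += 1
--         digit += 1
--     if direction == "E" and col > 1:
--         col -= 1
--         digit -= 1
--     return digit
--
-- def obter_digito(directions, digit):
--     """
--     This function takes one string containing one or more movements, and one int corresponding to the initial position
--     in the pad; then, it returns the resulting digit from executing every movement present in the directions string.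
--
--
--     :param direction: str
--     :param digit: int
--     :return: int
--     """
--
--
--     for letter in directions:
--         digit = obter_posicao(letter, digit)
--     return digit
--
-- def obter_pin(instructions: tuple) -> tuple:
--     """
--         This function takes one tuple containing between 4 and 10 movement sequences, returning the tuple of ints
--         containing the codified pin, accordingly to the "instructions" tuple. This tuple's elements must be strings
--         with 1 or more characters from ("C", "B", "E", "D"), raising a ValueError if not.
--
--
--         :param instructions: tuple
--         :return: tuple
--     """
--
--
--     # Verify if the "instrction"'s type is tuple, and if it has the right length; if not, raise an error
--
--     if type(instructions) != tuple or not 4 <= len(instructions) <= 10: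
--         raise ValueError("obter_pin: argumento invalido")
--
--     # Taking the digit 5 as the starting point, get the resulting digit from following the directions given in each step
--
--     digit = 5
--     pin = ()
--     for directions in instructions:
--         if type(directions) != str or len(directions) == 0:
--             raise ValueError("obter_pin: argumento invalido")
--         digit = obter_digito(directions, digit)
--
--         # Before following the next instruction, create a new "pin" tuple with the added digit
--
--         pin += (digit,)
--         for letter in directions:
--             if letter not in ("B", "E", "C", "D"):
--                 raise ValueError("obter_pin: argumento invalido")
--     return pin
-- ===== SOURCE B (Python) =====
-- def obter_pin(instructions: tuple) -> tuple:
--     # Same validation as A; movement simulated on (row, col) grid coordinates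
--     # with clamping, digit read off as 3*row + col + 1.
--     if type(instructions) != tuple or not 4 <= len(instructions) <= 10:
--         raise ValueError("obter_pin: argumento invalido")
--     row, col = 1, 1  # digit 5
--     pin = []
--     for directions in instructions:
--         if type(directions) != str or len(directions) == 0:
--             raise ValueError("obter_pin: argumento invalido")
--         for letter in directions:
--             if letter == "C":
--                 row = max(row - 1, 0)
--             elif letter == "B":
--                 row = min(row + 1, 2)
--             elif letter == "E":
--                 col = max(col - 1, 0)
--             elif letter == "D":
--                 col = min(col + 1, 2)
--             else:
--                 raise ValueError("obter_pin: argumento invalido")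
--         pin.append(3 * row + col + 1)
--     return tuple(pin)
-- ===== Notes on version B (the rewrite author's own statement) =====
-- stated objective: simpler
-- what changed: B replaces A's digit arithmetic (recomputing line/col from the digit at every step, four non-exclusive if-branches mutating digit) by a persistent clamped (row,col) coordinate state, reading each PIN digit as 3*row+col+1; validation and ValueError conditions are unchanged.
import Mathlib
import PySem

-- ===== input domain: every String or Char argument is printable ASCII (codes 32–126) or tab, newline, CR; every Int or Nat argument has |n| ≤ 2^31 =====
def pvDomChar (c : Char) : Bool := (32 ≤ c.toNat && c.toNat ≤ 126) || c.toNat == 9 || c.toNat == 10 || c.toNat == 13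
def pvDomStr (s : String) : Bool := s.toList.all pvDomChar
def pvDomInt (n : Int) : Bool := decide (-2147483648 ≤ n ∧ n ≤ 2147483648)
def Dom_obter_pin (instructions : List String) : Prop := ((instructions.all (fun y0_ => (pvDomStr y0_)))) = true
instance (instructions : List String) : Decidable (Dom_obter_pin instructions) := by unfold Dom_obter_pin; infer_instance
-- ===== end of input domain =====

-- B replaces A's per-step digit arithmetic by a persistent clamped (row,col)
-- coordinate state (objective: simpler). Equivalence is about return values;
-- on inputs where A raises ValueError (excluded by Pre_), B raises too.

-- ===== PORT A =====
def obter_posicao (direction : Char) (digit : Int) : Int :=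
  -- line/col recomputed from the digit, then four sequential non-exclusive ifs
  let lc : Int × Int :=
    if digit ≤ 3 then (1, digit)
    else if digit ≤ 6 then (2, digit - 3)
    else (3, digit - 6)
  let line := lc.1
  let col := lc.2
  let ld : Int × Int := if direction = 'C' ∧ line > 1 then (line - 1, digit - 3) else (line, digit)
  let line := ld.1
  let digit := ld.2
  let ld2 : Int × Int := if direction = 'B' ∧ line < 3 then (line + 1, digit + 3) else (line, digit)
  let digit := ld2.2
  let cd : Int × Int := if direction = 'D' ∧ col < 3 then (col + 1, digit + 1) else (col, digit)
  let col := cd.1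
  let digit := cd.2
  let cd2 : Int × Int := if direction = 'E' ∧ col > 1 then (col - 1, digit - 1) else (col, digit)
  cd2.2

def obter_digito (directions : String) (digit : Int) : Int :=
  directions.toList.foldl (fun d letter => obter_posicao letter d) digit

def obter_pin (instructions : List String) : List Int :=
  -- Python raises ValueError on bad shape / bad letters; those inputs are excluded by Pre_
  (instructions.foldl
    (fun (st : Int × List Int) directions =>
      let d := obter_digito directions st.1
      (d, st.2 ++ [d]))
    (5, [])).2

-- ===== PORT B =====
def pvMove (rc : Int × Int) (letter : Char) : Int × Int :=
  if letter = 'C' then (max (rc.1 - 1) 0, rc.2)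
  else if letter = 'B' then (min (rc.1 + 1) 2, rc.2)
  else if letter = 'E' then (rc.1, max (rc.2 - 1) 0)
  else if letter = 'D' then (rc.1, min (rc.2 + 1) 2)
  else rc  -- Source B raises ValueError here; such inputs are excluded by Pre_

def obter_pin_alt (instructions : List String) : List Int :=
  (instructions.foldl
    (fun (st : (Int × Int) × List Int) directions =>
      let rc := directions.toList.foldl pvMove st.1
      (rc, st.2 ++ [3 * rc.1 + rc.2 + 1]))
    ((1, 1), [])).2

-- ===== PRECONDITION & SPEC =====
-- Pre_ excludes exactly the inputs where A raises ValueError (length outside 4..10,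
-- an empty instruction string, or a letter outside {B,E,C,D}); B raises there too.
def Pre_obter_pin (instructions : List String) : Prop :=
  4 ≤ instructions.length ∧ instructions.length ≤ 10 ∧
    ∀ s ∈ instructions, s.toList ≠ [] ∧
      (s.toList.all (fun c => c == 'B' || c == 'E' || c == 'C' || c == 'D')) = true
instance (instructions : List String) : Decidable (Pre_obter_pin instructions) := by
  unfold Pre_obter_pin; infer_instance

def pvWitness_obter_pin : List String := ["C", "DD", "B", "E"]

def Spec_obter_pin (instructions : List String) (out : List Int) : Prop := out = obter_pin_alt instructions
instance (instructions : List String) (out : List Int) : Decidable (Spec_obter_pin instructions out) := by unfold Spec_obter_pin; infer_instance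

-- ===== CLAIM (what is proved, stated in full; the proofs are below) =====
def Claim_equal_obter_pin : Prop := ∀ (instructions : List String), Dom_obter_pin instructions → Pre_obter_pin instructions → Spec_obter_pin instructions (obter_pin instructions)

-- ===== LEMMAS AND PROOFS =====

-- one letter: A's digit update equals B's coordinate update under digit = 3r+c+1
lemma pv_step_eq (r c : Int) (hr : 0 ≤ r ∧ r ≤ 2) (hc : 0 ≤ c ∧ c ≤ 2) (l : Char)
    (hl : l = 'B' ∨ l = 'E' ∨ l = 'C' ∨ l = 'D') :
    obter_posicao l (3 * r + c + 1) = 3 * (pvMove (r, c) l).1 + (pvMove (r, c) l).2 + 1 := by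
  obtain ⟨hr0, hr2⟩ := hr
  obtain ⟨hc0, hc2⟩ := hc
  rcases hl with h | h | h | h <;> subst h <;>
    interval_cases r <;> interval_cases c <;> decide

lemma pv_move_bounds (rc : Int × Int) (l : Char) (hr : 0 ≤ rc.1 ∧ rc.1 ≤ 2) (hc : 0 ≤ rc.2 ∧ rc.2 ≤ 2) :
    (0 ≤ (pvMove rc l).1 ∧ (pvMove rc l).1 ≤ 2) ∧ (0 ≤ (pvMove rc l).2 ∧ (pvMove rc l).2 ≤ 2) := by
  simp only [pvMove]; split_ifs <;> first | (dsimp only; omega) | omega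

-- one instruction string: the two folds stay related
lemma pv_fold_eq (ls : List Char) (hl : ∀ x ∈ ls, x = 'B' ∨ x = 'E' ∨ x = 'C' ∨ x = 'D')
    (r c : Int) (hr : 0 ≤ r ∧ r ≤ 2) (hc : 0 ≤ c ∧ c ≤ 2) :
    ls.foldl (fun d letter => obter_posicao letter d) (3 * r + c + 1)
      = 3 * (ls.foldl pvMove (r, c)).1 + (ls.foldl pvMove (r, c)).2 + 1
    ∧ (0 ≤ (ls.foldl pvMove (r, c)).1 ∧ (ls.foldl pvMove (r, c)).1 ≤ 2)
    ∧ (0 ≤ (ls.foldl pvMove (r, c)).2 ∧ (ls.foldl pvMove (r, c)).2 ≤ 2) := by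
  induction ls generalizing r c with
  | nil => exact ⟨rfl, hr, hc⟩
  | cons x xs ih =>
    have hx := hl x (List.mem_cons_self ..)
    have hb := pv_move_bounds (r, c) x hr hc
    have hstep := pv_step_eq r c hr hc x hx
    simp only [List.foldl_cons, hstep]
    have := ih (fun y hy => hl y (List.mem_cons_of_mem _ hy))
      (pvMove (r, c) x).1 (pvMove (r, c) x).2 hb.1 hb.2
    simpa using this

-- whole instruction list: equal pin accumulators
lemma pv_outer (instrs : List String)
    (hv : ∀ s ∈ instrs, ∀ x ∈ s.toList, x = 'B' ∨ x = 'E' ∨ x = 'C' ∨ x = 'D')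
    (r c : Int) (hr : 0 ≤ r ∧ r ≤ 2) (hc : 0 ≤ c ∧ c ≤ 2) (acc : List Int) :
    (instrs.foldl
      (fun (st : Int × List Int) directions =>
        let d := obter_digito directions st.1
        (d, st.2 ++ [d])) (3 * r + c + 1, acc)).2
    = (instrs.foldl
      (fun (st : (Int × Int) × List Int) directions =>
        let rc := directions.toList.foldl pvMove st.1
        (rc, st.2 ++ [3 * rc.1 + rc.2 + 1])) ((r, c), acc)).2 := by
  induction instrs generalizing r c acc with
  | nil => rfl
  | cons s ss ih =>
    obtain ⟨heq, hr', hc'⟩ := pv_fold_eq s.toList (hv s (List.mem_cons_self ..)) r c hr hc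
    simp only [List.foldl_cons, obter_digito, heq]
    exact ih (fun t ht => hv t (List.mem_cons_of_mem _ ht))
      (s.toList.foldl pvMove (r, c)).1 (s.toList.foldl pvMove (r, c)).2 hr' hc' _

-- ===== VERDICT (by name: the statement is the Claim_ definition above) =====
theorem obter_pin_spec : Claim_equal_obter_pin := by
  intro instructions _ hpre
  unfold Spec_obter_pin obter_pin obter_pin_alt
  have hv : ∀ s ∈ instructions, ∀ x ∈ s.toList, x = 'B' ∨ x = 'E' ∨ x = 'C' ∨ x = 'D' := by
    intro s hs x hx
    have h := (hpre.2.2 s hs).2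
    simp only [List.all_eq_true, beq_iff_eq, Bool.or_eq_true] at h
    have := h x hx; tauto
  have := pv_outer instructions hv 1 1 (by omega) (by omega) []
  simpa using this
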